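-- pv_equiv track=rewrite | github.com/sepidfs/smart-recipe-finder | app.py | _style_cycle_for
-- ===== SOURCE A (Python) =====
-- def _style_cycle_for(tokens_low: set[str]) -> list[str]:
--     has_pasta = any(t in tokens_low for t in ["pasta","spaghetti","penne","tagliatelle"])
--     has_rice  = any(t in tokens_low for t in ["rice","basmati","jasmine","risotto"])
--     base = ["grill","skillet","curry","tray bake","one-pot pasta","pilaf","stir fry","soup","salad"]
--     if has_pasta and "one-pot pasta" in base:
--         base.remove("one-pot pasta"); base.insert(0,"one-pot pasta")
--     if has_rice and "pilaf" in base: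
--         base.remove("pilaf"); base.insert(0,"pilaf")
--     return base
-- ===== SOURCE B (Python) =====
-- def _style_cycle_for(tokens_low: set[str]) -> list[str]:
--     PASTA = {"pasta", "spaghetti", "penne", "tagliatelle"}
--     RICE = {"rice", "basmati", "jasmine", "risotto"}
--     has_pasta = any(t in PASTA for t in tokens_low)
--     has_rice = any(t in RICE for t in tokens_low)
--     def rank(style):
--         if has_rice and style == "pilaf":
--             return -2
--         if has_pasta and style == "one-pot pasta":
--             return -1
--         return 0
--     return sorted(["grill","skillet","curry","tray bake","one-pot pasta","pilaf","stir fry","soup","salad"], key=rank)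
-- ===== Notes on version B (the rewrite author's own statement) =====
-- stated objective: alternative
-- what changed: Replaces A's in-place remove/insert mutations by one stable sort of the base list under a priority key (pilaf before one-pot pasta before the rest when their flags are set), with the flags computed by scanning the tokens against keyword sets instead of the keywords against the token set.
import Mathlib
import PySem

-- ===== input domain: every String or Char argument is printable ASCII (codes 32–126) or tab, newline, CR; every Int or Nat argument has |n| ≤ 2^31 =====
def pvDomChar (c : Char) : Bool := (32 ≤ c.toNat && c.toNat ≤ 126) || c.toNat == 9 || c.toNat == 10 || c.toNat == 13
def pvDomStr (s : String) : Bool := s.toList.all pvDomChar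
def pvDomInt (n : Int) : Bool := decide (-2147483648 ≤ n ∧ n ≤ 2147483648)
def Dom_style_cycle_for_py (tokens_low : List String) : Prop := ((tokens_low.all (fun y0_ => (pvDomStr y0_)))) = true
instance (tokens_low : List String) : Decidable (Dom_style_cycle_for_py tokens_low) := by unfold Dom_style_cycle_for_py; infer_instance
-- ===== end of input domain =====

-- B replaces A's in-place remove/insert mutations by one stable sort of the base list
-- under a priority key (pilaf -2, one-pot pasta -1 when their flag is set, else 0),
-- and detects the flags by scanning the tokens against keyword sets (objective: alternative).

-- ===== PORT A =====
def style_cycle_for_py (tokens_low : List String) : List String :=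
  let has_pasta := (["pasta","spaghetti","penne","tagliatelle"]).any (fun t => PySem.Set.contains tokens_low t)
  let has_rice := (["rice","basmati","jasmine","risotto"]).any (fun t => PySem.Set.contains tokens_low t)
  let base := ["grill","skillet","curry","tray bake","one-pot pasta","pilaf","stir fry","soup","salad"]
  let base := if has_pasta && base.contains "one-pot pasta" then
      PySem.List.insert ((PySem.List.remove? base "one-pot pasta").getD base) 0 "one-pot pasta"
    else base
  let base := if has_rice && base.contains "pilaf" then
      PySem.List.insert ((PySem.List.remove? base "pilaf").getD base) 0 "pilaf"
    else base
  base

-- ===== PORT B =====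
def style_cycle_for_py_alt (tokens_low : List String) : List String :=
  let PASTA := PySem.Set.ofList ["pasta", "spaghetti", "penne", "tagliatelle"]
  let RICE := PySem.Set.ofList ["rice", "basmati", "jasmine", "risotto"]
  let has_pasta := tokens_low.any (fun t => PySem.Set.contains PASTA t)
  let has_rice := tokens_low.any (fun t => PySem.Set.contains RICE t)
  let rank : String → Int := fun style =>
    if has_rice && style == "pilaf" then -2
    else if has_pasta && style == "one-pot pasta" then -1
    else 0
  PySem.List.sorted ["grill","skillet","curry","tray bake","one-pot pasta","pilaf","stir fry","soup","salad"] rank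

-- ===== PRECONDITION & SPEC =====
def Spec_style_cycle_for_py (tokens_low : List String) (out : List String) : Prop := out = style_cycle_for_py_alt tokens_low
instance (tokens_low : List String) (out : List String) : Decidable (Spec_style_cycle_for_py tokens_low out) := by unfold Spec_style_cycle_for_py; infer_instance

-- ===== CLAIM (what is proved, stated in full; the proofs are below) =====
def Claim_equal_style_cycle_for_py : Prop := ∀ (tokens_low : List String), Dom_style_cycle_for_py tokens_low → Spec_style_cycle_for_py tokens_low (style_cycle_for_py tokens_low)

-- ===== LEMMAS AND PROOFS =====

theorem pv_membership_reduce (tl : List String) (kws : List String) :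
    (tl.any fun t => PySem.Set.contains (PySem.Set.ofList kws) t)
      = (kws.any fun t => PySem.Set.contains tl t) := by
  rw [Bool.eq_iff_iff]
  simp only [List.any_eq_true, PySem.Set.contains_iff, PySem.Set.mem_ofList]
  exact ⟨fun ⟨x, h1, h2⟩ => ⟨x, h2, h1⟩, fun ⟨x, h1, h2⟩ => ⟨x, h2, h1⟩⟩

-- ===== VERDICT (by name: the statement is the Claim_ definition above) =====
theorem style_cycle_for_py_spec : Claim_equal_style_cycle_for_py := by
  intro tl _
  unfold Spec_style_cycle_for_py style_cycle_for_py style_cycle_for_py_alt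
  simp only [pv_membership_reduce]
  cases (["pasta","spaghetti","penne","tagliatelle"]).any (fun t => PySem.Set.contains tl t) <;>
    cases (["rice","basmati","jasmine","risotto"]).any (fun t => PySem.Set.contains tl t) <;> rfl
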